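-- pv_equiv track=rewrite | github.com/alphaboss16/AI-Code | SliderLab/optimized.py | finish
-- ===== SOURCE A (Python) =====
-- def finish(dict, goal):
--     curr = goal
--     count = 0
--     while dict[curr] != '':
--         count += 1
--         curr = dict[curr]
--     list = {count: goal}
--     curr = goal
--     for i in range(count - 1, -1, -1):
--         list[i] = dict[curr]
--         curr = dict[curr]
--     return len(list) - 1
-- ===== SOURCE B (Python) =====
-- def finish(dict, goal):
--     v = dict[goal]
--     return 0 if v == '' else 1 + finish(dict, v)
-- ===== Notes on version B (the rewrite author's own statement) =====
-- stated objective: simpler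
-- what changed: B computes the chain length by direct recursion on the parent link (0 at the '' sentinel, else 1 + recurse), eliminating A's second pass that rebuilds the path into an int-keyed dict only to return its length minus one.
import Mathlib
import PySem

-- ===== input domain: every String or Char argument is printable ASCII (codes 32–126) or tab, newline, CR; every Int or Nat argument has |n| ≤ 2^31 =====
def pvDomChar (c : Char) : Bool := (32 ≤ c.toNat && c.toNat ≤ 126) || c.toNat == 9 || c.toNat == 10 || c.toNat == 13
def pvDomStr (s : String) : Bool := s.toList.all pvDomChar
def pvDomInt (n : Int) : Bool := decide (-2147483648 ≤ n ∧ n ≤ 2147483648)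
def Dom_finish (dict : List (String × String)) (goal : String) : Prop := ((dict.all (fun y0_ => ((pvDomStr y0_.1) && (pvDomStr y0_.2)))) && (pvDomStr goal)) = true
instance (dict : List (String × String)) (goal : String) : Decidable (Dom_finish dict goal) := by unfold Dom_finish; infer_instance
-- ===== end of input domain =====

-- B differs only in decomposition (recursion, no second pass); return values agree on Pre_.

-- ===== PORT A =====
-- while dict[curr] != '': count += 1; curr = dict[curr]
-- fuel (dict.length + 1) is only a totality guard; Pre_finish guarantees it suffices (none = KeyError / divergence).
def finishLoop (d : PySem.Dict String String) (curr : String) (count : Int) : Nat → Option Int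
  | 0 => none
  | f + 1 =>
    match d.get? curr with
    | none => none
    | some v => if v ≠ "" then finishLoop d v (count + 1) f else some count

def finish (dict : List (String × String)) (goal : String) : Int :=
  let d : PySem.Dict String String := PySem.Dict.mk dict
  match finishLoop d goal 0 (dict.length + 1) with
  | none => 0  -- unreachable under Pre_finish (Python raises KeyError / diverges)
  | some count =>
    -- list = {count: goal}; for i in range(count-1,-1,-1): list[i] = dict[curr]; curr = dict[curr]
    let lst : PySem.Dict Int String := PySem.Dict.insert PySem.Dict.empty count goal
    let st :=
      (PySem.List.pyRange (count - 1) (-1) (-1)).foldl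
        (fun (st : PySem.Dict Int String × String) i =>
          match d.get? st.2 with
          | some v => (st.1.insert i v, v)
          | none => st)  -- unreachable under Pre_finish (KeyError)
        (lst, goal)
    (st.1.size : Int) - 1

-- ===== PORT B =====
-- return 0 if dict[goal] == '' else 1 + finish(dict, dict[goal]); fuel is only a totality guard.
def altRec (d : PySem.Dict String String) (goal : String) : Nat → Int
  | 0 => 0
  | f + 1 =>
    match d.get? goal with
    | none => 0  -- unreachable under Pre_finish (Python raises KeyError)
    | some v => if v = "" then 0 else 1 + altRec d v f

def finish_alt (dict : List (String × String)) (goal : String) : Int :=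
  altRec (PySem.Dict.mk dict) goal (dict.length + 1)

-- ===== PRECONDITION & SPEC =====
-- n-fold parent lookup from a start node (none once a lookup misses).
def pvReach (d : PySem.Dict String String) (curr : String) : Nat → Option String
  | 0 => some curr
  | n + 1 =>
    match d.get? curr with
    | none => none
    | some v => pvReach d v n

-- Pre_: the parent chain from goal stays inside the dict and reaches a node mapped to ''
-- within dict.length steps (otherwise Python A raises KeyError or loops forever).
def Pre_finish (dict : List (String × String)) (goal : String) : Prop :=
  ∃ n < dict.length + 1,
    ((pvReach (PySem.Dict.mk dict) goal n).bind
      (fun s => PySem.Dict.get? (PySem.Dict.mk dict) s)) = some ""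

instance (dict : List (String × String)) (goal : String) : Decidable (Pre_finish dict goal) := by
  unfold Pre_finish; infer_instance

def pvWitness_finish : (List (String × String)) × String :=
  ([("a", "b"), ("b", "c"), ("c", "")], "a")

def Spec_finish (dict : List (String × String)) (goal : String) (out : Int) : Prop := out = finish_alt dict goal
instance (dict : List (String × String)) (goal : String) (out : Int) : Decidable (Spec_finish dict goal out) := by unfold Spec_finish; infer_instance

-- ===== CLAIM (what is proved, stated in full; the proofs are below) =====
def Claim_equal_finish : Prop := ∀ (dict : List (String × String)) (goal : String), Dom_finish dict goal → Pre_finish dict goal → Spec_finish dict goal (finish dict goal)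

-- ===== LEMMAS AND PROOFS =====

-- m successful lookups in a row starting from s (values unconstrained).
def okSteps (d : PySem.Dict String String) : String → Nat → Prop
  | _, 0 => True
  | s, m + 1 => ∃ v, d.get? s = some v ∧ okSteps d v m

-- A's while loop, when it returns, returns start + B's recursion (same fuel).
theorem finishLoop_eq_altRec (d : PySem.Dict String String) :
    ∀ (f : Nat) (curr : String) (c r : Int),
      finishLoop d curr c f = some r → r = c + altRec d curr f := by
  intro f
  induction f with
  | zero => intro curr c r h; simp [finishLoop] at h
  | succ f ih =>
    intro curr c r h
    simp only [finishLoop] at h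
    cases hg : d.get? curr with
    | none => rw [hg] at h; simp at h
    | some v =>
      rw [hg] at h
      by_cases hv : v = ""
      · simp [hv] at h
        simp [altRec, hg, hv]
        omega
      · simp [hv] at h
        have := ih v (c + 1) r h
        simp [altRec, hg, hv]
        omega

theorem finishLoop_okSteps (d : PySem.Dict String String) :
    ∀ (f : Nat) (curr : String) (c r : Int),
      finishLoop d curr c f = some r → c ≤ r ∧ okSteps d curr (r - c).toNat := by
  intro f
  induction f with
  | zero => intro curr c r h; simp [finishLoop] at h
  | succ f ih =>
    intro curr c r h
    simp only [finishLoop] at h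
    cases hg : d.get? curr with
    | none => rw [hg] at h; simp at h
    | some v =>
      rw [hg] at h
      by_cases hv : v = ""
      · simp [hv] at h
        subst h
        exact ⟨le_refl c, by simp [okSteps]⟩
      · simp [hv] at h
        obtain ⟨hle, hok⟩ := ih v (c + 1) r h
        refine ⟨by omega, ?_⟩
        have hnat : (r - c).toNat = (r - (c + 1)).toNat + 1 := by omega
        rw [hnat]
        exact ⟨v, hg, hok⟩

theorem finishLoop_total (d : PySem.Dict String String) :
    ∀ (f n : Nat) (curr : String) (c : Int),
      n < f →
      ((pvReach d curr n).bind (fun s => d.get? s)) = some "" →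
      ∃ r, finishLoop d curr c f = some r := by
  intro f
  induction f with
  | zero => intro n curr c h; omega
  | succ f ih =>
    intro n curr c hn hreach
    cases n with
    | zero =>
      simp [pvReach] at hreach
      exact ⟨c, by simp [finishLoop, hreach]⟩
    | succ m =>
      simp only [pvReach] at hreach
      cases hg : d.get? curr with
      | none => rw [hg] at hreach; simp at hreach
      | some v =>
        rw [hg] at hreach
        by_cases hv : v = ""
        · exact ⟨c, by simp [finishLoop, hg, hv]⟩
        · have ⟨r, hr⟩ := ih m v (c + 1) (by omega) hreach
          exact ⟨r, by simp [finishLoop, hg, hv, hr]⟩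

-- The second loop over fresh distinct keys grows the dict by one entry per iteration.
theorem loop2_size (d : PySem.Dict String String) :
    ∀ (L : List Int) (lst : PySem.Dict Int String) (curr : String),
      L.Nodup → (∀ i ∈ L, lst.contains i = false) → okSteps d curr L.length →
      ((L.foldl
        (fun (st : PySem.Dict Int String × String) i =>
          match d.get? st.2 with
          | some v => (st.1.insert i v, v)
          | none => st)
        (lst, curr)).1).size = lst.size + L.length := by
  intro L
  induction L with
  | nil => intro lst curr _ _ _; simp
  | cons i T ih =>
    intro lst curr hnd hfresh hok
    obtain ⟨v, hg, hok'⟩ := hok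
    simp only [List.foldl_cons, hg]
    have hfresh_i : lst.contains i = false := hfresh i (List.mem_cons_self)
    have hsize : (lst.insert i v).size = lst.size + 1 := by
      simp [PySem.Dict.size_insert, hfresh_i]
    have := ih (lst.insert i v) v (List.Nodup.of_cons hnd)
      (fun j hj => by
        rw [PySem.Dict.contains_insert]
        have hji : j ≠ i := by
          intro hji; subst hji; exact (List.nodup_cons.mp hnd).1 hj
        simp [hji, hfresh j (List.mem_cons_of_mem _ hj)]) hok'
    simp only [this, hsize, List.length_cons]
    omega

-- ===== VERDICT (by name: the statement is the Claim_ definition above) =====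
theorem finish_spec : Claim_equal_finish := by
  intro dict goal _ hpre
  obtain ⟨n, hn, hreach⟩ := hpre
  unfold Spec_finish finish finish_alt
  set d : PySem.Dict String String := PySem.Dict.mk dict with hd
  obtain ⟨r, hr⟩ := finishLoop_total d (dict.length + 1) n goal 0 hn hreach
  simp only [hr]
  have halt : r = 0 + altRec d goal (dict.length + 1) := finishLoop_eq_altRec d _ goal 0 r hr
  obtain ⟨hge, hok⟩ := finishLoop_okSteps d _ goal 0 r hr
  simp only [Int.sub_zero] at hok
  have hlen : (PySem.List.pyRange (r - 1) (-1) (-1)).length = r.toNat := by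
    rw [PySem.List.length_pyRange_neg_one]; omega
  have hsz := loop2_size d (PySem.List.pyRange (r - 1) (-1) (-1))
      (PySem.Dict.insert PySem.Dict.empty r goal) goal
      (by
        rw [PySem.List.pyRange_neg_one_eq_reverse]
        exact List.nodup_reverse.mpr (PySem.List.nodup_pyRange_one _ _))
      (by
        intro i hi
        rw [PySem.List.mem_pyRange_neg_one] at hi
        rw [PySem.Dict.contains_insert]
        have : i ≠ r := by omega
        simp [this])
      (by rw [hlen]; exact hok)
  rw [hlen] at hsz
  have hsz1 : (PySem.Dict.insert (PySem.Dict.empty : PySem.Dict Int String) r goal).size = 1 := by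
    simp [PySem.Dict.size_insert]
  simp only [hsz, hsz1]
  omega
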